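-- pv_equiv track=rewrite | github.com/RuZhan2024/Final_Project | ops/scripts/plot_dataset_balance.py | _count
-- ===== SOURCE A (Python) =====
-- from typing import Any, Dict, Iterable, List
--
-- def _count(keys: Iterable[str], labels: Dict[str, int]) -> Dict[str, int]:
--     pos = neg = miss = 0
--     for k in keys:
--         if k not in labels:
--             miss += 1
--             continue
--         if labels[k] == 1:
--             pos += 1
--         else:
--             neg += 1
--     return {"fall": pos, "nonfall": neg, "missing": miss}
-- ===== SOURCE B (Python) =====
-- def _count(keys, labels):
--     ks = list(keys)
--
--     def go(chunk):
--         # divide and conquer: the three counts are additive over concatenation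
--         if not chunk:
--             return (0, 0, 0)
--         if len(chunk) == 1:
--             k = chunk[0]
--             if k not in labels:
--                 return (0, 0, 1)
--             return (1, 0, 0) if labels[k] == 1 else (0, 1, 0)
--         m = len(chunk) // 2
--         a = go(chunk[:m])
--         b = go(chunk[m:])
--         return (a[0] + b[0], a[1] + b[1], a[2] + b[2])
--
--     pos, neg, miss = go(ks)
--     return {"fall": pos, "nonfall": neg, "missing": miss}
-- ===== Notes on version B (the rewrite author's own statement) =====
-- stated objective: alternative
-- what changed: Replaces A's single imperative three-counter loop by a divide-and-conquer recursion: split the key list in half, count each half recursively, and add the (fall, nonfall, missing) triples, correct because the three counts are additive over concatenation.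
import Mathlib
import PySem

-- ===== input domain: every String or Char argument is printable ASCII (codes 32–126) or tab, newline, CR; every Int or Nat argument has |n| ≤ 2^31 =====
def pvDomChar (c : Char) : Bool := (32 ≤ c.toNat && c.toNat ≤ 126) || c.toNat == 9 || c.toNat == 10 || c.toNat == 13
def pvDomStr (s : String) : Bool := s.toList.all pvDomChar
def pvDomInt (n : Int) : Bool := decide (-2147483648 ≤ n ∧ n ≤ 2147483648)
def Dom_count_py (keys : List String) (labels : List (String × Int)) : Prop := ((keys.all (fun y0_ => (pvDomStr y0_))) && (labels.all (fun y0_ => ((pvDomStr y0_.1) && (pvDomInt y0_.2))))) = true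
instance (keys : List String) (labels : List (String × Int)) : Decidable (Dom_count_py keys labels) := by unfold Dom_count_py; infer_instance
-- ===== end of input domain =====

-- B replaces A's single three-counter loop by a divide-and-conquer recursion (objective: alternative).

-- ===== PORT A =====
-- the for-loop of _count: state (pos, neg, miss)
def countLoopA (d : PySem.Dict String Int) : List String → Int → Int → Int → Int × Int × Int
  | [], pos, neg, miss => (pos, neg, miss)
  | k :: ks, pos, neg, miss =>
    if d.contains k = false then countLoopA d ks pos neg (miss + 1)
    else if d.getD k 0 = 1 then countLoopA d ks (pos + 1) neg miss
    else countLoopA d ks pos (neg + 1) miss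

def count_py (keys : List String) (labels : List (String × Int)) : List (String × Int) :=
  let d := PySem.Dict.ofList labels
  let r := countLoopA d keys 0 0 0
  [("fall", r.1), ("nonfall", r.2.1), ("missing", r.2.2)]

-- ===== PORT B =====
-- pointwise sum of two (pos, neg, miss) triples
def addT (a b : Int × Int × Int) : Int × Int × Int := (a.1 + b.1, a.2.1 + b.2.1, a.2.2 + b.2.2)

-- go(chunk): Python's chunk[:m] / chunk[m:] with 0 ≤ m ≤ len(chunk) are exactly take m / drop m
def goB (d : PySem.Dict String Int) : List String → Int × Int × Int
  | [] => (0, 0, 0)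
  | [k] =>
    if d.contains k = false then (0, 0, 1)
    else if d.getD k 0 = 1 then (1, 0, 0) else (0, 1, 0)
  | a :: b :: t =>
    let m := (a :: b :: t).length / 2
    addT (goB d ((a :: b :: t).take m)) (goB d ((a :: b :: t).drop m))
  termination_by ks => ks.length
  decreasing_by
  · simp; omega
  · simp; omega

def count_py_alt (keys : List String) (labels : List (String × Int)) : List (String × Int) :=
  let d := PySem.Dict.ofList labels
  let r := goB d keys
  [("fall", r.1), ("nonfall", r.2.1), ("missing", r.2.2)]

-- ===== PRECONDITION & SPEC =====
def Spec_count_py (keys : List String) (labels : List (String × Int)) (out : List (String × Int)) : Prop := out = count_py_alt keys labels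
instance (keys : List String) (labels : List (String × Int)) (out : List (String × Int)) : Decidable (Spec_count_py keys labels out) := by unfold Spec_count_py; infer_instance

-- ===== CLAIM (what is proved, stated in full; the proofs are below) =====
def Claim_equal_count_py : Prop := ∀ (keys : List String) (labels : List (String × Int)), Dom_count_py keys labels → Spec_count_py keys labels (count_py keys labels)

-- ===== LEMMAS AND PROOFS =====
-- the per-key triple, and the fold both programs compute
def classifyT (d : PySem.Dict String Int) (k : String) : Int × Int × Int :=
  if d.contains k = false then (0, 0, 1)
  else if d.getD k 0 = 1 then (1, 0, 0) else (0, 1, 0)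

def sumT (d : PySem.Dict String Int) (ks : List String) : Int × Int × Int :=
  ks.foldr (fun k acc => addT (classifyT d k) acc) (0, 0, 0)

theorem addT_assoc (a b c : Int × Int × Int) : addT (addT a b) c = addT a (addT b c) := by
  simp [addT]; omega

theorem addT_zero (a : Int × Int × Int) : addT a (0, 0, 0) = a := by
  simp [addT]

theorem sumT_append (d : PySem.Dict String Int) (xs ys : List String) :
    sumT d (xs ++ ys) = addT (sumT d xs) (sumT d ys) := by
  induction xs with
  | nil =>
    simp [sumT, addT]
  | cons x xs ih =>
    simp only [sumT, List.foldr_cons, List.cons_append] at *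
    rw [ih, addT_assoc]

theorem goB_eq_sumT (d : PySem.Dict String Int) :
    ∀ n (ks : List String), ks.length ≤ n → goB d ks = sumT d ks := by
  intro n
  induction n with
  | zero =>
    intro ks h
    have : ks = [] := by cases ks <;> simp_all
    subst this; simp [goB, sumT]
  | succ n ih =>
    intro ks h
    match ks with
    | [] => simp [goB, sumT]
    | [k] => simp [goB, sumT, classifyT, addT_zero]
    | a :: b :: t =>
      rw [goB]
      have hlen : (a :: b :: t).length = t.length + 2 := by simp
      set m := (a :: b :: t).length / 2 with hm
      have h1 : ((a :: b :: t).take m).length ≤ n := by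
        simp only [List.length_take]; omega
      have h2 : ((a :: b :: t).drop m).length ≤ n := by
        simp only [List.length_drop]; omega
      rw [ih _ h1, ih _ h2, ← sumT_append, List.take_append_drop]

theorem countLoopA_eq_sumT (d : PySem.Dict String Int) (ks : List String)
    (pos neg miss : Int) :
    countLoopA d ks pos neg miss = addT (pos, neg, miss) (sumT d ks) := by
  induction ks generalizing pos neg miss with
  | nil => simp [countLoopA, sumT, addT]
  | cons k ks ih =>
    rw [countLoopA]
    have hstep : sumT d (k :: ks) = addT (classifyT d k) (sumT d ks) := rfl
    by_cases hc : d.contains k = false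
    · rw [if_pos hc, ih, hstep]
      simp [classifyT, hc, addT]; omega
    · rw [if_neg hc]
      by_cases hv : d.getD k 0 = 1
      · rw [if_pos hv, ih, hstep]
        simp [classifyT, hc, hv, addT]; omega
      · rw [if_neg hv, ih, hstep]
        simp [classifyT, hc, hv, addT]; omega

-- ===== VERDICT (by name: the statement is the Claim_ definition above) =====
theorem count_py_spec : Claim_equal_count_py := by
  intro keys labels _
  unfold Spec_count_py count_py count_py_alt
  dsimp only
  rw [countLoopA_eq_sumT, goB_eq_sumT _ keys.length keys le_rfl]
  simp [addT]
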